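-- pv_equiv track=rewrite | github.com/AliK3112/TekkenPresetMaker | utils.py | pushEmptyToEnd
-- ===== SOURCE A (Python) =====
-- def pushEmptyToEnd(arr):
--     n = len(arr)
--     count = 0
--     for i in range(n):
--         if arr[i] != "":
--             arr[count] = arr[i]
--             count += 1
--     while count < n:
--         arr[count] = ""
--         count += 1
--     return arr
-- ===== SOURCE B (Python) =====
-- def pushEmptyToEnd(arr):
--     # Stable sort by emptiness: non-empty (False) first, empty (True) last;
--     # Timsort stability preserves relative order within each group.
--     arr.sort(key=lambda x: x == "")
--     return arr
-- ===== Notes on version B (the rewrite author's own statement) =====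
-- stated objective: idiomatic
-- what changed: Replaces the manual two-phase compaction (copy non-empties forward by index, then overwrite the tail with empty strings) with a single in-place stable sort keyed on emptiness.
import Mathlib
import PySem

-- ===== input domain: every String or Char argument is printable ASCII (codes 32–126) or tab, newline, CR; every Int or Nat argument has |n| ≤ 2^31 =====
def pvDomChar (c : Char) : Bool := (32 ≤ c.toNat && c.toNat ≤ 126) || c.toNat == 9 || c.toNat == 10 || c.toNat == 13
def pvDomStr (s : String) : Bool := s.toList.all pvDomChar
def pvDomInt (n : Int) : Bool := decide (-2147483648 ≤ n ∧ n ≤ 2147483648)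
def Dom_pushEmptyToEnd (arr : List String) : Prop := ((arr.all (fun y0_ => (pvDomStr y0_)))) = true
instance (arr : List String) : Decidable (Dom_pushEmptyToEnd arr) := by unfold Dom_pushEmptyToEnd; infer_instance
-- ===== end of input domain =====

-- B replaces A's manual two-phase in-place compaction with a single stable sort
-- keyed on emptiness (idiomatic). Both Pythons mutate arr in place; the
-- theorems here are about the returned value.


-- ===== PORT A =====
-- one iteration of A's `for i in range(n)` body; the index i is always in range
-- (the loop preserves the list's length), so the `none` arm is unreachable
def pushStep (st : List String × Nat) (i : Nat) : List String × Nat :=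
  match st.1[i]? with
  | some v => if v ≠ "" then (st.1.set st.2 v, st.2 + 1) else st
  | none => st

-- A's `while count < n` tail-filling loop
def pushFill (a : List String) (count n : Nat) : List String :=
  if count < n then pushFill (a.set count "") (count + 1) n else a
termination_by n - count

def pushEmptyToEnd (arr : List String) : List String :=
  let n := arr.length
  let st := (List.range n).foldl pushStep (arr, 0)
  pushFill st.1 st.2 n

-- ===== PORT B =====
-- Source B's arr.sort(key=lambda x: x == "") : Python's stable sort is
-- PySem.List.sorted; the Bool key (False < True) is ported as the Int key 0/1
def pushEmptyToEnd_alt (arr : List String) : List String :=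
  PySem.List.sorted arr (fun x => if x = "" then (1 : Int) else 0) false

-- ===== PRECONDITION & SPEC =====
def Spec_pushEmptyToEnd (arr : List String) (out : List String) : Prop := out = pushEmptyToEnd_alt arr
instance (arr : List String) (out : List String) : Decidable (Spec_pushEmptyToEnd arr out) := by unfold Spec_pushEmptyToEnd; infer_instance

-- ===== CLAIM (what is proved, stated in full; the proofs are below) =====
def Claim_equal_pushEmptyToEnd : Prop := ∀ (arr : List String), Dom_pushEmptyToEnd arr → Spec_pushEmptyToEnd arr (pushEmptyToEnd arr)

-- ===== LEMMAS AND PROOFS =====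

-- insertBy places x after every element it is not `before`, and ahead of the rest
theorem insertBy_mid (before : String → String → Bool) (x : String)
    (F E : List String) (hF : ∀ y ∈ F, before x y = false)
    (hE : ∀ y ∈ E, before x y = true) :
    PySem.List.insertBy before x (F ++ E) = F ++ x :: E := by
  induction F with
  | nil =>
    cases E with
    | nil => simp [PySem.List.insertBy]
    | cons e es => simp [PySem.List.insertBy, hE e (by simp)]
  | cons f F ih =>
    have hf := hF f (by simp)
    simp only [List.cons_append, PySem.List.insertBy, hf, Bool.false_eq_true]
    simp [ih (fun y hy => hF y (by simp [hy]))]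

-- B computes: the non-empty strings (in order) followed by the empty ones
theorem alt_eq_filter (arr : List String) :
    pushEmptyToEnd_alt arr = arr.filter (· ≠ "") ++ arr.filter (· = "") := by
  unfold pushEmptyToEnd_alt
  rw [PySem.List.sorted_eq_foldl_insertBy]
  induction arr using List.reverseRecOn with
  | nil => simp
  | append_singleton xs x ih =>
    rw [List.foldl_append, List.foldl_cons, List.foldl_nil, ih]
    by_cases hx : x = ""
    · subst hx
      rw [PySem.List.insertBy_of_forall_not_before]
      · simp
      · intro y _; simp; split <;> simp
    · rw [insertBy_mid _ x _ _ ?_ ?_]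
      · simp [hx]
      · intro y hy
        have hy' : ¬ y = "" := by simpa using List.of_mem_filter hy
        simp [hx, hy']
      · intro y hy
        have hy' : y = "" := by simpa using List.of_mem_filter hy
        simp [hx, hy']

-- invariant of A's first loop after i iterations
theorem loop_inv (arr : List String) (i : Nat) (h : i ≤ arr.length) :
    ((List.range i).foldl pushStep (arr, 0)).2
        = ((arr.take i).filter (· ≠ "")).length ∧
    ((List.range i).foldl pushStep (arr, 0)).1.length = arr.length ∧
    ((List.range i).foldl pushStep (arr, 0)).1.take
        (((List.range i).foldl pushStep (arr, 0)).2)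
        = (arr.take i).filter (· ≠ "") ∧
    ((List.range i).foldl pushStep (arr, 0)).1.drop i = arr.drop i := by
  induction i with
  | zero => simp
  | succ i ih =>
    obtain ⟨hc, hl, ht, hd⟩ := ih (Nat.le_of_succ_le h)
    set st := (List.range i).foldl pushStep (arr, 0) with hst
    have hi : i < arr.length := h
    have hci : st.2 ≤ i := by
      rw [hc]
      calc ((arr.take i).filter (· ≠ "")).length
          ≤ (arr.take i).length := List.length_filter_le _ _
        _ ≤ i := by simp
    have hget : st.1[i]? = some (arr[i]) := by
      have h0 : st.1[i]? = arr[i]? := by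
        have := congrArg (fun l => l[0]?) hd
        simpa [List.getElem?_drop] using this
      rw [h0]; exact List.getElem?_eq_getElem hi
    have hd1 : st.1.drop (i + 1) = arr.drop (i + 1) := by
      have := congrArg (List.drop 1) hd
      simpa [List.drop_drop] using this
    rw [List.range_succ, List.foldl_append, List.foldl_cons, List.foldl_nil, ← hst]
    have htake : arr.take (i + 1) = arr.take i ++ [arr[i]] := by
      rw [List.take_add_one]; simp [List.getElem?_eq_getElem hi]
    by_cases hv : arr[i] = ""
    · -- skipped element
      simp only [pushStep, hget, hv, ne_eq, not_true_eq_false, if_neg,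
        not_false_eq_true]
      exact ⟨by simp [htake, hv, hc], hl, by simp [htake, hv, ht], hd1⟩
    · -- kept element: write it at position st.2
      have hclen : st.2 < st.1.length := by omega
      have hset : st.1.set st.2 arr[i]
          = st.1.take st.2 ++ arr[i] :: st.1.drop (st.2 + 1) := by
        rw [List.set_eq_take_append_cons_drop, if_pos hclen]
      have hKlen : (st.1.take st.2).length = st.2 := by simp; omega
      have hfilt : (arr.take (i + 1)).filter (· ≠ "")
          = (arr.take i).filter (· ≠ "") ++ [arr[i]] := by
        rw [htake, List.filter_append]; simp [hv]
      simp only [pushStep, hget, ne_eq, hv, not_false_eq_true, if_pos]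
      refine ⟨?_, by simp [hl], ?_, ?_⟩
      · rw [hfilt]; simp [hc]
      · rw [hset, List.take_append, hKlen,
          List.take_of_length_le (show (st.1.take st.2).length ≤ st.2 + 1 by rw [hKlen]; omega),
          show st.2 + 1 - st.2 = 1 by omega, ht, hfilt]
        simp
      · rw [hset, List.drop_append, hKlen,
          List.drop_eq_nil_of_le (by omega : (st.1.take st.2).length ≤ i + 1),
          List.nil_append,
          show i + 1 - st.2 = (i - st.2) + 1 by omega,
          List.drop_succ_cons, List.drop_drop,
          show st.2 + 1 + (i - st.2) = i + 1 by omega, hd1]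

-- the tail-filling loop overwrites everything from `count` on with ""
theorem fill_eq (a : List String) (c n : Nat) (hl : a.length = n) (hc : c ≤ n) :
    pushFill a c n = a.take c ++ List.replicate (n - c) "" := by
  unfold pushFill
  split
  · next h =>
    rw [fill_eq (a.set c "") (c + 1) n (by simp [hl]) (by omega)]
    have hcl : c < a.length := by omega
    have hset : a.set c "" = a.take c ++ "" :: a.drop (c + 1) := by
      rw [List.set_eq_take_append_cons_drop, if_pos hcl]
    have hKlen : (a.take c).length = c := by simp; omega
    rw [hset, List.take_append, hKlen,
      List.take_of_length_le (by omega),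
      show c + 1 - c = 1 by omega]
    simp [show n - c = (n - (c + 1)) + 1 by omega, List.replicate_succ]
  · next h =>
    have hcn : c = n := by omega
    subst hcn
    simp [List.take_of_length_le (show a.length ≤ c by omega)]
termination_by n - c

-- the empty strings of arr are exactly a replicate of the right length
theorem filter_len_split (arr : List String) :
    (arr.filter (· ≠ "")).length + (arr.filter (· = "")).length = arr.length := by
  induction arr with
  | nil => simp
  | cons x xs ih =>
    by_cases hx : x = "" <;> simp [hx] at ih ⊢ <;> omega

theorem filter_empty_replicate (arr : List String) :
    arr.filter (· = "")
      = List.replicate (arr.length - (arr.filter (· ≠ "")).length) "" := by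
  rw [List.eq_replicate_iff]
  constructor
  · have := filter_len_split arr
    omega
  · intro b hb
    simpa using List.of_mem_filter hb

-- ===== VERDICT (by name: the statement is the Claim_ definition above) =====
theorem pushEmptyToEnd_spec : Claim_equal_pushEmptyToEnd := by
  unfold Claim_equal_pushEmptyToEnd Spec_pushEmptyToEnd
  intro arr _
  unfold pushEmptyToEnd
  obtain ⟨hc, hl, ht, hd⟩ := loop_inv arr arr.length le_rfl
  set st := (List.range arr.length).foldl pushStep (arr, 0) with hst
  simp only []
  rw [fill_eq st.1 st.2 arr.length hl
      (by rw [hc]; simpa using List.length_filter_le _ arr),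
    ht, alt_eq_filter]
  simp only [List.take_length] at ht hc ⊢
  rw [hc, ← filter_empty_replicate]
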